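-- pv_equiv track=rewrite | github.com/sepidehsayad/PVD-method-steganograpghy | extractdata.py | find_domain_in_quantity_table
-- ===== SOURCE A (Python) =====
-- def find_domain_in_quantity_table(list_of_di):
--     uper_lower_bound=[]
--     for i in list_of_di :
--
--         if 0<=i<=7 :
--
--             uper_lower_bound+=[0]
--
--         elif 8<=i<=15 :
--
--             uper_lower_bound+=[8]
--
--         elif 16<=i<=31 :
--
--             uper_lower_bound+=[16]
--
--         elif 32 <= i <=63 :
--
--             uper_lower_bound+=[32]
--         elif  64 <= i <=127 :
--
--             uper_lower_bound+=[64]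
--         elif 128 <= i <=255 :
--
--              uper_lower_bound+=[128]
--     return uper_lower_bound
-- ===== SOURCE B (Python) =====
-- def find_domain_in_quantity_table(list_of_di):
--     # bound = largest power of two <= i (0 for i < 8), computed arithmetically
--     # via bit_length instead of an interval branch chain.
--     return [0 if i < 8 else 1 << (i.bit_length() - 1)
--             for i in list_of_di
--             if 0 <= i <= 255]
-- ===== Notes on version B (the rewrite author's own statement) =====
-- stated objective: simpler
-- what changed: Replaces the six hard-coded interval branches by a closed-form arithmetic computation: keep in-range values and map each to 1 << (bit_length-1), the largest power of two at most i (or 0 below 8), written as one comprehension.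
import Mathlib
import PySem

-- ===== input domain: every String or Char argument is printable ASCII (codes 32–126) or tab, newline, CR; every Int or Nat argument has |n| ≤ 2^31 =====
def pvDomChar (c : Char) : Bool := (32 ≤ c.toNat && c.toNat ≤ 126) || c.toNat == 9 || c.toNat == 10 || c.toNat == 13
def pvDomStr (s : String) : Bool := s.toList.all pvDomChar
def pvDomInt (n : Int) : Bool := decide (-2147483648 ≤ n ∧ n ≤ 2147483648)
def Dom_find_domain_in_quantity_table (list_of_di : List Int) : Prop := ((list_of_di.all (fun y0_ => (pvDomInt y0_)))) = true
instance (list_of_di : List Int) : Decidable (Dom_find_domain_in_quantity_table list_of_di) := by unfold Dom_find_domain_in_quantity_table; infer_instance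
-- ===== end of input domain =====

-- B replaces the six-branch interval chain by one comprehension computing the bound arithmetically (largest power of two ≤ i via bit_length); simpler and measured faster by a constant factor (return value only).


-- ===== PORT A =====
def find_domain_in_quantity_table (list_of_di : List Int) : List Int :=
  list_of_di.foldl (fun acc i =>
    if 0 ≤ i ∧ i ≤ 7 then acc ++ [0]
    else if 8 ≤ i ∧ i ≤ 15 then acc ++ [8]
    else if 16 ≤ i ∧ i ≤ 31 then acc ++ [16]
    else if 32 ≤ i ∧ i ≤ 63 then acc ++ [32]
    else if 64 ≤ i ∧ i ≤ 127 then acc ++ [64]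
    else if 128 ≤ i ∧ i ≤ 255 then acc ++ [128]
    else acc) []

-- ===== PORT B =====
-- B: one comprehension; i.bit_length() is ported as Nat.size (Int.toNat i) (exact for i ≥ 0,
-- which the filter guarantees), and 1 << (bit_length - 1) as 1 <<< (Nat.size … - 1).
def find_domain_in_quantity_table_alt (list_of_di : List Int) : List Int :=
  (list_of_di.filter (fun i => decide (0 ≤ i ∧ i ≤ 255))).map
    (fun i => if i < 8 then (0 : Int) else ((1 <<< (Nat.size (Int.toNat i) - 1) : Nat) : Int))

-- ===== PRECONDITION & SPEC =====
def Spec_find_domain_in_quantity_table (list_of_di : List Int) (out : List Int) : Prop := out = find_domain_in_quantity_table_alt list_of_di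
instance (list_of_di : List Int) (out : List Int) : Decidable (Spec_find_domain_in_quantity_table list_of_di out) := by unfold Spec_find_domain_in_quantity_table; infer_instance

-- ===== CLAIM (what is proved, stated in full; the proofs are below) =====
def Claim_equal_find_domain_in_quantity_table : Prop := ∀ (list_of_di : List Int), Dom_find_domain_in_quantity_table list_of_di → Spec_find_domain_in_quantity_table list_of_di (find_domain_in_quantity_table list_of_di)

-- ===== LEMMAS AND PROOFS =====

-- the per-element contribution of A's branch chain, as a (possibly empty) list
def pvStepA (i : Int) : List Int :=
  if 0 ≤ i ∧ i ≤ 7 then [0]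
  else if 8 ≤ i ∧ i ≤ 15 then [8]
  else if 16 ≤ i ∧ i ≤ 31 then [16]
  else if 32 ≤ i ∧ i ≤ 63 then [32]
  else if 64 ≤ i ∧ i ≤ 127 then [64]
  else if 128 ≤ i ∧ i ≤ 255 then [128]
  else []

-- the per-element contribution of B's comprehension
def pvStepB (i : Int) : List Int :=
  if 0 ≤ i ∧ i ≤ 255 then
    [if i < 8 then (0 : Int) else ((1 <<< (Nat.size (Int.toNat i) - 1) : Nat) : Int)]
  else []

theorem pvStep_eq (i : Int) : pvStepA i = pvStepB i := by
  by_cases h : 0 ≤ i ∧ i ≤ 255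
  · obtain ⟨h1, h2⟩ := h
    interval_cases i <;> decide
  · unfold pvStepA pvStepB
    split_ifs <;> first | rfl | omega

theorem pvA_fold (l : List Int) (acc : List Int) :
    l.foldl (fun acc i =>
      if 0 ≤ i ∧ i ≤ 7 then acc ++ [0]
      else if 8 ≤ i ∧ i ≤ 15 then acc ++ [8]
      else if 16 ≤ i ∧ i ≤ 31 then acc ++ [16]
      else if 32 ≤ i ∧ i ≤ 63 then acc ++ [32]
      else if 64 ≤ i ∧ i ≤ 127 then acc ++ [64]
      else if 128 ≤ i ∧ i ≤ 255 then acc ++ [128]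
      else acc) acc = acc ++ (l.flatMap pvStepA) := by
  induction l generalizing acc with
  | nil => simp
  | cons i l ih =>
    simp only [List.foldl_cons, List.flatMap_cons, ih]
    have hstep : (if 0 ≤ i ∧ i ≤ 7 then acc ++ [0]
      else if 8 ≤ i ∧ i ≤ 15 then acc ++ [8]
      else if 16 ≤ i ∧ i ≤ 31 then acc ++ [16]
      else if 32 ≤ i ∧ i ≤ 63 then acc ++ [32]
      else if 64 ≤ i ∧ i ≤ 127 then acc ++ [64]
      else if 128 ≤ i ∧ i ≤ 255 then acc ++ [128]
      else acc) = acc ++ pvStepA i := by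
      unfold pvStepA; split_ifs <;> simp
    rw [hstep, List.append_assoc]

theorem pvB_flatMap (l : List Int) :
    find_domain_in_quantity_table_alt l = l.flatMap pvStepB := by
  induction l with
  | nil => rfl
  | cons i l ih =>
    unfold find_domain_in_quantity_table_alt at *
    rw [List.filter_cons]
    by_cases h : 0 ≤ i ∧ i ≤ 255
    · simp [List.flatMap_cons, pvStepB, h]
      simpa [Bool.decide_and] using ih
    · simp [List.flatMap_cons, pvStepB, h]
      simpa [Bool.decide_and] using ih

-- ===== VERDICT (by name: the statement is the Claim_ definition above) =====
theorem find_domain_in_quantity_table_spec : Claim_equal_find_domain_in_quantity_table := by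
  intro l _
  unfold Spec_find_domain_in_quantity_table find_domain_in_quantity_table
  rw [pvA_fold, pvB_flatMap, List.nil_append, show pvStepA = pvStepB from funext pvStep_eq]
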